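-- pv_equiv track=rewrite | github.com/SanderBeekhuis/AdventOfCode2020 | day18/main.py | matching_top_level_star
-- ===== SOURCE A (Python) =====
-- def matching_top_level_star(line):
--     """
--     Finds the index of the first matching star not enclosed in brackets
--     """
--
--     # Find matching close:
--     open_brackets = 0
--     for i, c in enumerate(line):
--         if c == '(':
--             open_brackets += 1
--         if c == ')':
--             open_brackets -= 1
--         if c == '*' and open_brackets == 0:
--             return i
--
--     return None
-- ===== SOURCE B (Python) =====
-- def matching_top_level_star(line):
--     """
--     Finds the index of the first matching star not enclosed in brackets
--     """
--     # Jump between '*' occurrences; a star is top-level iff its prefix has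
--     # equally many '(' and ')' (that count difference is exactly the depth).
--     start = 0
--     while True:
--         i = line.find('*', start)
--         if i == -1:
--             return None
--         if line[:i].count('(') == line[:i].count(')'):
--             return i
--         start = i + 1
-- ===== Notes on version B (the rewrite author's own statement) =====
-- stated objective: faster
-- what changed: B replaces A's per-character scan with an inline depth counter by an occurrence-jumping loop: str.find jumps directly to each '*' and the candidate is tested by comparing '(' and ')' counts of its prefix, with no depth accumulator at all.
import Mathlib
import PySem

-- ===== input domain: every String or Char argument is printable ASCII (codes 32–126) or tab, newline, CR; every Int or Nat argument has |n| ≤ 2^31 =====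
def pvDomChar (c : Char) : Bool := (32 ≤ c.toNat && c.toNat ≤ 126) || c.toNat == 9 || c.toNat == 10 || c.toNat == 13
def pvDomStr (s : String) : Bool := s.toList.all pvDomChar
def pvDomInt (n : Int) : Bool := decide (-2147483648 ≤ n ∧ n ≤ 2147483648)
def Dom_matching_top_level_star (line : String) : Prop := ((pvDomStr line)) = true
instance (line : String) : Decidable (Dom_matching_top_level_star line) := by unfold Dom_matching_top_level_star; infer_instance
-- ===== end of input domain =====

-- B replaces A's per-character depth-counter scan by a str.find occurrence-jumping loop that tests each '*' by comparing '(' and ')' counts of its prefix (measured faster: C-level find/count instead of a Python char loop).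


-- ===== PORT A =====
-- A's single loop: enumerate characters, maintain the open-bracket counter inline.
def pvAGo : List Char → Int → Int → Option Int
  | [], _, _ => none
  | c :: cs, i, ob =>
    let ob1 := if c = '(' then ob + 1 else ob
    let ob2 := if c = ')' then ob1 - 1 else ob1
    if c = '*' ∧ ob2 = 0 then some i else pvAGo cs (i + 1) ob2

def matching_top_level_star (line : String) : Option Int :=
  pvAGo line.toList 0 0

-- ===== PORT B =====
-- Source B's while-loop: line.find('*', start), test line[:i].count('(') == line[:i].count(')').
-- The fuel argument (length + 1) is a totality guard only: each iteration moves start past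
-- the found '*', so at most length + 1 iterations can ever run.
def pvBLoop (cs : List Char) : Nat → Int → Option Int
  | 0, _ => none
  | fuel + 1, start =>
    let i := PySem.Chars.findFrom cs ['*'] start none
    if i = -1 then none
    else if PySem.Chars.count (PySem.List.slice cs none (some i)) ['('] =
            PySem.Chars.count (PySem.List.slice cs none (some i)) [')'] then some i
    else pvBLoop cs fuel (i + 1)

def matching_top_level_star_alt (line : String) : Option Int :=
  pvBLoop line.toList (line.toList.length + 1) 0

-- ===== PRECONDITION & SPEC =====
def Spec_matching_top_level_star (line : String) (out : Option Int) : Prop := out = matching_top_level_star_alt line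
instance (line : String) (out : Option Int) : Decidable (Spec_matching_top_level_star line out) := by unfold Spec_matching_top_level_star; infer_instance

-- ===== CLAIM (what is proved, stated in full; the proofs are below) =====
def Claim_equal_matching_top_level_star : Prop := ∀ (line : String), Dom_matching_top_level_star line → Spec_matching_top_level_star line (matching_top_level_star line)

-- ===== LEMMAS AND PROOFS =====

-- bracket balance of a prefix (proof-only helper)
def pvBal (cs : List Char) : Int := (cs.count '(' : Int) - (cs.count ')' : Int)

theorem pvBal_nil : pvBal [] = 0 := rfl

theorem pvBal_append (p q : List Char) : pvBal (p ++ q) = pvBal p + pvBal q := by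
  simp [pvBal, List.count_append]; push_cast; ring

-- PySem.Chars.count with a single-character needle is List.count
theorem pvCount_go_singleton (c : Char) :
    ∀ (fuel : Nat) (s : List Char) (acc : Nat), s.length ≤ fuel →
      PySem.Chars.count.go [c] fuel s acc = acc + s.count c := by
  intro fuel
  induction fuel with
  | zero => intro s acc h; cases s with
    | nil => simp [PySem.Chars.count.go]
    | cons a t => simp at h
  | succ n ih =>
    intro s acc h
    cases s with
    | nil => simp [PySem.Chars.count.go]
    | cons a t =>
      by_cases hc : c = a
      · subst hc
        simp [PySem.Chars.count.go, List.isPrefixOf, ih t (acc + 1) (by simpa using h)]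
        omega
      · simp [PySem.Chars.count.go, List.isPrefixOf, hc, ih t acc (by simpa using h),
          List.count_cons, Ne.symm hc]

theorem pvCount_singleton (s : List Char) (c : Char) :
    PySem.Chars.count s [c] = s.count c := by
  simpa [PySem.Chars.count] using pvCount_go_singleton c s.length s 0 le_rfl

-- A's loop over a star-free prefix just accumulates the balance
theorem pvAGo_append (p : List Char) (h : '*' ∉ p) :
    ∀ (rest : List Char) (i ob : Int),
      pvAGo (p ++ rest) i ob = pvAGo rest (i + p.length) (ob + pvBal p) := by
  induction p with
  | nil => intro rest i ob; simp [pvBal]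
  | cons c p' ih =>
    intro rest i ob
    have hc : c ≠ '*' := by rintro rfl; exact h (by simp)
    have hp' : '*' ∉ p' := fun hm => h (by simp [hm])
    have hstep : (if c = ')' then (if c = '(' then ob + 1 else ob) - 1
        else (if c = '(' then ob + 1 else ob)) = ob + pvBal [c] := by
      simp [pvBal, List.count_singleton]
      split_ifs <;> simp_all <;> ring
    simp only [List.cons_append, pvAGo, hc, false_and, if_false, hstep]
    rw [ih hp' rest (i + 1) (ob + pvBal [c])]
    have : pvBal (c :: p') = pvBal [c] + pvBal p' := pvBal_append [c] p'
    congr 1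
    · push_cast [List.length_cons]; ring
    · rw [this]; ring

theorem pvAGo_no_star (p : List Char) (h : '*' ∉ p) (i ob : Int) :
    pvAGo p i ob = none := by
  have := pvAGo_append p h [] i ob
  simpa using this

theorem pvAGo_star (rest : List Char) (i ob : Int) :
    pvAGo ('*' :: rest) i ob = if ob = 0 then some i else pvAGo rest (i + 1) ob := by
  simp [pvAGo]

-- main loop correspondence
theorem pvMain (cs : List Char) :
    ∀ (fuel : Nat) (start : Nat), start ≤ cs.length → cs.length - start < fuel →
      pvBLoop cs fuel (start : Int) =
        pvAGo (cs.drop start) (start : Int) (pvBal (cs.take start)) := by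
  intro fuel
  induction fuel with
  | zero => intro start h1 h2; omega
  | succ n ih =>
    intro start h1 h2
    simp only [pvBLoop]
    rw [PySem.Chars.findFrom_natCast cs ['*'] start h1]
    by_cases h0 : PySem.Chars.find (cs.drop start) ['*'] = -1
    · -- no '*' from start on: both sides give none
      have hnostar : '*' ∉ cs.drop start := by
        intro hmem
        obtain ⟨l₁, l₂, hl⟩ := List.append_of_mem hmem
        exact ((PySem.Chars.find_eq_neg_one_iff _ _).mp h0) ⟨l₁, l₂, by simp [hl]⟩
      rw [pvAGo_no_star _ hnostar]
      simp [h0]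
    · set f := PySem.Chars.find (cs.drop start) ['*'] with hfd
      have hf0 : 0 ≤ f := by
        have := PySem.Chars.neg_one_le_find (cs.drop start) ['*']
        omega
      obtain ⟨hpre, hmin⟩ := PySem.Chars.find_spec (s := cs.drop start) (sub := ['*']) hf0
      set j := f.toNat with hjd
      obtain ⟨rest, hrest⟩ := hpre
      have hjlen : start + j < cs.length := by
        have hlen : (['*'] ++ rest).length = ((cs.drop start).drop j).length := by rw [hrest]
        simp at hlen
        omega
      have hdropj : (cs.drop start).drop j = '*' :: rest := by simpa using hrest.symm
      have hp_nostar : '*' ∉ (cs.drop start).take j := by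
        intro hmem
        obtain ⟨m, hmlt, hget⟩ := List.mem_iff_getElem.mp hmem
        have hmj : m < j := lt_of_lt_of_le hmlt (by simp)
        have hmlen : m < (cs.drop start).length := by simp at hmlt ⊢; omega
        apply hmin m hmj
        refine ⟨(cs.drop start).drop (m + 1), ?_⟩
        rw [List.drop_eq_getElem_cons hmlen]
        have : (cs.drop start)[m] = '*' := by
          rw [← hget]; simp [List.getElem_take]
        rw [this]; rfl
      have hsplit : cs.drop start = (cs.drop start).take j ++ '*' :: rest := by
        conv_lhs => rw [← List.take_append_drop j (cs.drop start)]
        rw [hdropj]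
      have hplen : ((cs.drop start).take j).length = j := by simp; omega
      have hfj : f = (j : Int) := by omega
      have hne : ¬ ((start : Int) + f = -1) := by omega
      simp only [h0, if_false, hne]
      -- the prefix slice is take (start + j), its counts give the balance
      have hslice : PySem.List.slice cs none (some ((start : Int) + f)) = cs.take (start + j) := by
        rw [PySem.List.slice_to _ (by omega)]
        congr 1
        omega
      have htake : cs.take (start + j) = cs.take start ++ (cs.drop start).take j := by
        rw [List.take_add]
      have hbal : pvBal (cs.take (start + j)) =
          pvBal (cs.take start) + pvBal ((cs.drop start).take j) := by
        rw [htake, pvBal_append]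
      -- A side: skip the star-free prefix, then look at the star
      conv_rhs => rw [hsplit, pvAGo_append _ hp_nostar, hplen, pvAGo_star]
      rw [hslice, pvCount_singleton, pvCount_singleton]
      rw [← hbal]
      by_cases hz : pvBal (cs.take (start + j)) = 0
      · have hcnt : (cs.take (start + j)).count '(' = (cs.take (start + j)).count ')' := by
          simp [pvBal] at hz; omega
        rw [if_pos hcnt, if_pos hz, hfj]
      · have hcnt : ¬ (cs.take (start + j)).count '(' = (cs.take (start + j)).count ')' := by
          intro hc; exact hz (by simp [pvBal, hc])
        rw [if_neg hcnt, if_neg hz]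
        have hcast : (start : Int) + f + 1 = ((start + j + 1 : Nat) : Int) := by
          push_cast; omega
        rw [hcast, ih (start + j + 1) (by omega) (by omega)]
        have hdrop1 : cs.drop (start + j + 1) = rest := by
          have e1 : cs.drop (start + j + 1) = ((cs.drop start).drop j).drop 1 := by
            rw [List.drop_drop, List.drop_drop]; ring_nf
          rw [e1, hdropj]; rfl
        have hbal1 : pvBal (cs.take (start + j + 1)) = pvBal (cs.take (start + j)) := by
          have e2 : cs.take (start + j + 1) = cs.take (start + j) ++ (cs.drop (start + j)).take 1 := by
            rw [List.take_add]
          have e3 : cs.drop (start + j) = '*' :: rest := by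
            rw [← hdropj, List.drop_drop]
          rw [e2, e3, pvBal_append]
          simp [pvBal]
        rw [hdrop1, hbal1, hbal]
        congr 1


-- ===== VERDICT (by name: the statement is the Claim_ definition above) =====
theorem matching_top_level_star_spec : Claim_equal_matching_top_level_star := by
  intro line _
  unfold Spec_matching_top_level_star matching_top_level_star matching_top_level_star_alt
  have h := pvMain line.toList (line.toList.length + 1) 0 (by omega) (by omega)
  simp only [Nat.cast_zero, List.drop_zero, List.take_zero] at h
  rw [h, pvBal_nil]
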